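-- pv_equiv track=rewrite | github.com/rasooll/Python-Learning | week6/Tamrin/vowels.py | _vowels_
-- ===== SOURCE A (Python) =====
-- def _vowels_ (simple_string):
-- 	number = 0
-- 	simple_string = simple_string.lower()
-- 	vowels_character_list = ['a', 'e', 'o', 'i', 'u']
-- 	for char in simple_string:
-- 		if char in vowels_character_list:
-- 			number = number + 1
-- 	return number
-- ===== SOURCE B (Python) =====
-- def _vowels_(simple_string):
--     lowered = simple_string.lower()
--     return sum(lowered.count(v) for v in 'aeiou')
-- ===== Notes on version B (the rewrite author's own statement) =====
-- stated objective: idiomatic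
-- what changed: Replaces the single per-character loop with a vowel-list membership test by one str.count scan of the lowered string per vowel, summed over the fixed vowel set; the per-vowel scans run in C, removing the Python-level per-character work.
import Mathlib
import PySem

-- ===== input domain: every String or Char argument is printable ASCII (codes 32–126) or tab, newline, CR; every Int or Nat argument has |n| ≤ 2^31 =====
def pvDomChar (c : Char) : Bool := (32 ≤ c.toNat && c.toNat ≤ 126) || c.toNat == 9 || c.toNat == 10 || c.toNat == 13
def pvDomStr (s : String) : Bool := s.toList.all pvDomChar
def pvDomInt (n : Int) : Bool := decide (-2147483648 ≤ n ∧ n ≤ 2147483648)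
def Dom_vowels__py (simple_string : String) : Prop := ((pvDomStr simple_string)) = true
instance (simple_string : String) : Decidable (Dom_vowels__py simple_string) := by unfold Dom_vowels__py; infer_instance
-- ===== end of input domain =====

-- B counts each vowel with one str.count scan of the lowered string and sums; idiomatic multi-pass vs A's single membership-testing loop.
-- ===== PORT A =====
def vowels__py (simple_string : String) : Int :=
  let simple_string := PySem.Str.lower simple_string
  let vowels_character_list : List Char := ['a', 'e', 'o', 'i', 'u']
  simple_string.toList.foldl
    (fun number char => if char ∈ vowels_character_list then number + 1 else number) 0

-- ===== PORT B =====
def vowels__py_alt (simple_string : String) : Int :=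
  let lowered := PySem.Str.lower simple_string
  (("aeiou".toList).map (fun v => (PySem.Str.count lowered (String.ofList [v]) : Int))).sum

-- ===== PRECONDITION & SPEC =====
def Spec_vowels__py (simple_string : String) (out : Int) : Prop := out = vowels__py_alt simple_string
instance (simple_string : String) (out : Int) : Decidable (Spec_vowels__py simple_string out) := by unfold Spec_vowels__py; infer_instance

-- ===== CLAIM (what is proved, stated in full; the proofs are below) =====
def Claim_equal_vowels__py : Prop := ∀ (simple_string : String), Dom_vowels__py simple_string → Spec_vowels__py simple_string (vowels__py simple_string)

-- ===== LEMMAS AND PROOFS =====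

-- str.count for a single-character needle counts occurrences of that character
theorem count_go_single (c : Char) : ∀ (fuel : Nat) (l : List Char) (acc : Nat),
    l.length ≤ fuel → PySem.Chars.count.go [c] fuel l acc = acc + l.count c := by
  intro fuel
  induction fuel with
  | zero =>
    intro l acc h
    cases l with
    | nil => simp [PySem.Chars.count.go]
    | cons x t => simp at h
  | succ n ih =>
    intro l acc h
    cases l with
    | nil => simp [PySem.Chars.count.go]
    | cons x t =>
      simp only [List.length_cons, Nat.succ_le_succ_iff] at h
      by_cases hc : c = x
      · subst hc
        simp [PySem.Chars.count.go, List.isPrefixOf, ih t _ h, List.count_cons]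
        omega
      · have hpre : ([c].isPrefixOf (x :: t)) = false := by
          simp [List.isPrefixOf]; exact fun h' => hc h'
        simp [PySem.Chars.count.go, hpre, ih t _ h, List.count_cons, hc]
        exact fun h' => hc h'.symm

theorem count_single (cs : List Char) (c : Char) :
    PySem.Chars.count cs [c] = cs.count c := by
  simp [PySem.Chars.count, count_go_single c cs.length cs 0 le_rfl]

-- a membership-count over distinct candidates splits into per-candidate counts
theorem countP_vowels (l : List Char) :
    (l.countP (fun ch => decide (ch ∈ (['a', 'e', 'o', 'i', 'u'] : List Char))) : Int)
      = (l.count 'a' : Int) + l.count 'e' + l.count 'i' + l.count 'o' + l.count 'u' := by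
  induction l with
  | nil => simp
  | cons x t ih =>
    simp only [List.countP_cons, List.count_cons]
    push_cast
    by_cases ha : x = 'a' <;> by_cases he : x = 'e' <;> by_cases hi : x = 'i' <;>
      by_cases ho : x = 'o' <;> by_cases hu : x = 'u' <;> simp_all <;> omega

-- ===== VERDICT (by name: the statement is the Claim_ definition above) =====
theorem vowels__py_spec : Claim_equal_vowels__py := by
  intro s _
  unfold Spec_vowels__py vowels__py vowels__py_alt
  simp only [PySem.Str.count_eq]
  generalize (PySem.Str.lower s).toList = l
  rw [PySem.List.foldl_ite_add_one, countP_vowels]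
  simp only [show ("aeiou".toList) = ['a', 'e', 'i', 'o', 'u'] from rfl, List.map_cons,
    List.map_nil, List.sum_cons, List.sum_nil,
    String.toList_ofList, count_single]
  ring
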